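-- pv_equiv track=rewrite | github.com/AdamZhouSE/pythonHomework | Code/CodeRecords/2870/60797/287973.py | find
-- ===== SOURCE A (Python) =====
-- def find(n, data):
--     re = sum(data)
--     data.sort()
--     for i in range(n):
--         if re%2==0:
--             return re
--         else:
--             re -= data[i]
-- ===== SOURCE B (Python) =====
-- def find(n, data):
--     # Closed form, no sort: if the total is odd, the loop in A ends up subtracting
--     # exactly the elements smaller than the smallest odd element, then that odd.
--     # Note: unlike A, this does not sort `data` in place (return value is the same).
--     if n <= 0:
--         return None
--     total = sum(data)
--     if total % 2 == 0:
--         return total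
--     # total odd => at least one odd element exists
--     m = min(x for x in data if x % 2 != 0)
--     k = sum(1 for x in data if x < m)          # all of them are even
--     below = sum(x for x in data if x < m)
--     if n >= k + 2:
--         return total - below - m
--     return None
-- ===== Notes on version B (the rewrite author's own statement) =====
-- stated objective: alternative
-- what changed: B replaces A's sort-then-scan (subtract sorted elements one by one until the running sum is even) with a closed-form one-pass characterisation: if the total is odd it finds the smallest odd element m, counts and sums the elements below m, and returns total - (sum below m) - m when the iteration budget n allows it; no sort and no index loop.
import Mathlib
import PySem

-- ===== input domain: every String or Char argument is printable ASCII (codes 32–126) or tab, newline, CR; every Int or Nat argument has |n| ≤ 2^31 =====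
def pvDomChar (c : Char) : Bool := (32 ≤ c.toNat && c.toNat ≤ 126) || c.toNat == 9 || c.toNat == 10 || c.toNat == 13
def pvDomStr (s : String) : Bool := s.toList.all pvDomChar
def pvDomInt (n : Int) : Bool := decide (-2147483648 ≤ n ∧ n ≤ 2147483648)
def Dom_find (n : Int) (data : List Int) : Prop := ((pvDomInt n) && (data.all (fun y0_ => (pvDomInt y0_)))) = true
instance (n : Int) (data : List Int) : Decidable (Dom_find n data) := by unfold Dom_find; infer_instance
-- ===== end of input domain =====

-- B is a one-pass closed form of A's sort-and-subtract loop (no sort, no index loop);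
-- A sorts `data` in place — the equivalence proved here is about the return value only.

-- ===== PORT A =====
-- the for-loop of A: i runs over range(n), subtracting s[i] while re is odd
def findLoopA (s : List Int) (n : Int) (re i : Int) : Option Int :=
  if _h : i < n then
    if PySem.Int.mod re 2 = 0 then some re
    else
      match PySem.List.pyGet? s i with
      | none => none        -- IndexError; unreachable (an odd sum makes re even before the index overruns)
      | some x => findLoopA s n (re - x) (i + 1)
  else none
termination_by (n - i).toNat
decreasing_by omega

def find (n : Int) (data : List Int) : Option Int :=
  let re := data.sum
  let s := PySem.List.sorted data (fun x => x) false
  findLoopA s n re 0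

-- ===== PORT B =====
def find_alt (n : Int) (data : List Int) : Option Int :=
  if n ≤ 0 then none
  else
    let total := data.sum
    if PySem.Int.mod total 2 = 0 then some total
    else
      match PySem.List.min? (data.filter (fun x => decide (PySem.Int.mod x 2 ≠ 0))) (fun x => x) with
      | none => none        -- ValueError of min(); unreachable (an odd total contains an odd element)
      | some m =>
        let k : Int := (data.filter (fun x => decide (x < m))).length
        let below := (data.filter (fun x => decide (x < m))).sum
        if k + 2 ≤ n then some (total - below - m) else none

-- ===== PRECONDITION & SPEC =====
def Spec_find (n : Int) (data : List Int) (out : Option Int) : Prop := out = find_alt n data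
instance (n : Int) (data : List Int) (out : Option Int) : Decidable (Spec_find n data out) := by unfold Spec_find; infer_instance

-- ===== CLAIM (what is proved, stated in full; the proofs are below) =====
def Claim_equal_find : Prop := ∀ (n : Int) (data : List Int), Dom_find n data → Spec_find n data (find n data)

-- ===== LEMMAS AND PROOFS =====

theorem sum_even_of_all_even (l : List Int) (h : ∀ x ∈ l, x % 2 = 0) : l.sum % 2 = 0 := by
  induction l with
  | nil => simp
  | cons x t ih =>
    have hx := h x (by simp)
    have ht := ih (fun y hy => h y (by simp [hy]))
    simp only [List.sum_cons]
    omega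

theorem exists_odd_of_sum_odd (l : List Int) (h : l.sum % 2 ≠ 0) : ∃ x ∈ l, x % 2 ≠ 0 := by
  by_contra hc
  refine h (sum_even_of_all_even l ?_)
  intro x hx
  by_contra hodd
  exact hc ⟨x, hx, hodd⟩

-- the loop of A, started at index pre.length over the sorted list pre ++ lo2 ++ m :: rest,
-- with re odd and every element of lo2 even: it subtracts lo2 then m, returning when even.
theorem mod2_int (a : Int) : PySem.Int.mod a 2 = a % 2 :=
  PySem.Int.mod_eq_emod_of_pos (by norm_num)

theorem loopA_run (m : Int) (rest : List Int) (hm : m % 2 ≠ 0) :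
    ∀ (lo2 pre : List Int) (n re : Int),
      (∀ x ∈ lo2, x % 2 = 0) → re % 2 ≠ 0 →
      findLoopA (pre ++ lo2 ++ m :: rest) n re (pre.length : Int) =
        if (pre.length : Int) + lo2.length + 2 ≤ n then some (re - lo2.sum - m) else none := by
  intro lo2
  induction lo2 with
  | nil =>
    intro pre n re _ hre
    simp only [List.append_nil, List.length_nil, List.sum_nil, Nat.cast_zero]
    by_cases h1 : (pre.length : Int) < n
    · rw [findLoopA, dif_pos h1]
      simp only [mod2_int, PySem.List.pyGet?_append_length, if_neg hre]
      rw [findLoopA]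
      by_cases h2 : (pre.length : Int) + 1 < n
      · rw [dif_pos h2]
        rw [mod2_int, if_pos (by omega), if_pos (by omega)]
        norm_num
      · rw [dif_neg h2, if_neg (by omega)]
    · rw [findLoopA, dif_neg h1, if_neg (by omega)]
  | cons x t ih =>
    intro pre n re hlo hre
    have hx : x % 2 = 0 := hlo x (by simp)
    by_cases h1 : (pre.length : Int) < n
    · rw [findLoopA, dif_pos h1]
      have hassoc : pre ++ (x :: t) ++ m :: rest = pre ++ x :: (t ++ m :: rest) := by simp
      rw [hassoc]
      simp only [mod2_int, PySem.List.pyGet?_append_length, if_neg hre]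
      have hrearr : pre ++ x :: (t ++ m :: rest) = (pre ++ [x]) ++ t ++ m :: rest := by simp
      have hlen : ((pre ++ [x]).length : Int) = (pre.length : Int) + 1 := by simp
      have key := ih (pre ++ [x]) n (re - x) (fun y hy => hlo y (by simp [hy])) (by omega)
      rw [hlen] at key
      rw [hrearr, key]
      by_cases h2 : (pre.length : Int) + 1 + (t.length : Int) + 2 ≤ n
      · rw [if_pos h2, if_pos (by simp only [List.length_cons]; push_cast; omega)]
        congr 1
        simp only [List.sum_cons]
        ring
      · rw [if_neg h2, if_neg (by simp only [List.length_cons]; push_cast; omega)]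
    · rw [findLoopA, dif_neg h1, if_neg (by simp only [List.length_cons]; push_cast; omega)]

theorem find_spec' : ∀ (n : Int) (data : List Int), find n data = find_alt n data := by
  intro n data
  by_cases hn : n ≤ 0
  · rw [show find n data = findLoopA (PySem.List.sorted data (fun x => x) false) n data.sum 0 from rfl,
      findLoopA, dif_neg (by omega)]
    simp [find_alt, hn]
  · by_cases hT : data.sum % 2 = 0
    · rw [show find n data = findLoopA (PySem.List.sorted data (fun x => x) false) n data.sum 0 from rfl,
        findLoopA, dif_pos (by omega : (0:Int) < n)]
      simp [find_alt, hn, hT]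
    · -- odd total
      obtain ⟨x0, hx0mem, hx0odd⟩ := exists_odd_of_sum_odd data hT
      have hx0odds : x0 ∈ data.filter (fun x => decide (PySem.Int.mod x 2 ≠ 0)) := by
        simp only [List.mem_filter, mod2_int, decide_eq_true_eq]
        exact ⟨hx0mem, hx0odd⟩
      cases hmin : PySem.List.min? (data.filter (fun x => decide (PySem.Int.mod x 2 ≠ 0))) (fun x => x) with
      | none =>
        rw [PySem.List.min?_eq_none_iff] at hmin
        rw [hmin] at hx0odds
        simp at hx0odds
      | some m =>
        have hmmem : m ∈ data.filter (fun x => decide (PySem.Int.mod x 2 ≠ 0)) :=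
          PySem.List.min?_mem hmin
        have hmmin : ∀ y ∈ data.filter (fun x => decide (PySem.Int.mod x 2 ≠ 0)), m ≤ y :=
          PySem.List.min?_isMin hmin
        have hmdata : m ∈ data := (List.mem_filter.mp hmmem).1
        have hmodd : m % 2 ≠ 0 := by
          have := (List.mem_filter.mp hmmem).2
          simpa [mod2_int] using this
        -- decompose the sorted list around the first odd element
        have hperm : (PySem.List.sorted data (fun x => x) false).Perm data :=
          PySem.List.sorted_perm data (fun x => x) false
        have hpair : (PySem.List.sorted data (fun x => x) false).Pairwise (fun a b => a ≤ b) :=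
          PySem.List.sorted_pairwise data (fun x => x)
        set s := PySem.List.sorted data (fun x => x) false with hs_def
        set lo := s.takeWhile (fun x => decide (x < m)) with hlo_def
        have hsplit : lo ++ s.dropWhile (fun x => decide (x < m)) = s :=
          List.takeWhile_append_dropWhile
        have hlo_lt : ∀ x ∈ lo, x < m := by
          intro x hx
          have := List.mem_takeWhile_imp hx
          simpa using this
        have hm_s : m ∈ s := hperm.mem_iff.mpr hmdata
        have hm_dw : m ∈ s.dropWhile (fun x => decide (x < m)) := by
          rcases (List.mem_append.mp (hsplit ▸ hm_s)) with h | h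
          · exact absurd (hlo_lt m h) (lt_irrefl m)
          · exact h
        obtain ⟨h, t, hdw⟩ : ∃ h t, s.dropWhile (fun x => decide (x < m)) = h :: t := by
          cases hdwe : s.dropWhile (fun x => decide (x < m)) with
          | nil => rw [hdwe] at hm_dw; simp at hm_dw
          | cons a b => exact ⟨a, b, rfl⟩
        have hh_ge : m ≤ h := by
          have := List.head?_dropWhile_not (fun x => decide (x < m)) s
          rw [hdw] at this
          simp at this
          omega
        have hpair_dw : (h :: t).Pairwise (fun a b => a ≤ b) := by
          have hp2 := hpair
          rw [← hsplit, hdw] at hp2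
          exact (List.pairwise_append.mp hp2).2.1
        have hh_le_t : ∀ y ∈ t, h ≤ y := (List.pairwise_cons.mp hpair_dw).1
        have hhm : h = m := by
          rw [hdw] at hm_dw
          rcases List.mem_cons.mp hm_dw with h' | h'
          · omega
          · have := hh_le_t m h'
            omega
        have hs : s = lo ++ m :: t := by rw [← hsplit, hdw, hhm]
        have ht_ge : ∀ y ∈ t, m ≤ y := hhm ▸ hh_le_t
        have hlo_even : ∀ x ∈ lo, x % 2 = 0 := by
          intro x hx
          by_contra hodd
          have hxdata : x ∈ data := hperm.mem_iff.mp (hsplit ▸ List.mem_append_left _ hx)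
          have hxodds : x ∈ data.filter (fun y => decide (PySem.Int.mod y 2 ≠ 0)) := by
            simp only [List.mem_filter, mod2_int, decide_eq_true_eq]
            exact ⟨hxdata, hodd⟩
          have := hmmin x hxodds
          have := hlo_lt x hx
          omega
        -- the filter used by B equals lo (as a permutation)
        have hfilter_s : s.filter (fun x => decide (x < m)) = lo := by
          rw [hs]
          rw [List.filter_append]
          have h1 : lo.filter (fun x => decide (x < m)) = lo :=
            List.filter_eq_self.mpr (fun x hx => by simpa using hlo_lt x hx)
          have h2 : (m :: t).filter (fun x => decide (x < m)) = [] := by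
            rw [List.filter_eq_nil_iff]
            intro y hy
            rcases List.mem_cons.mp hy with h' | h'
            · simp [h']
            · have := ht_ge y h'
              simp
              omega
          rw [h1, h2, List.append_nil]
        have hfperm : (data.filter (fun x => decide (x < m))).Perm lo := by
          have := (hperm.filter (fun x => decide (x < m))).symm
          rwa [hfilter_s] at this
        have hflen : (data.filter (fun x => decide (x < m))).length = lo.length :=
          hfperm.length_eq
        have hfsum : (data.filter (fun x => decide (x < m))).sum = lo.sum :=
          hfperm.sum_eq
        -- evaluate A via the loop lemma
        have hA : find n data =
            (if (0 : Int) + (lo.length : Int) + 2 ≤ n then some (data.sum - lo.sum - m) else none) := by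
          have key := loopA_run m t hmodd lo [] n data.sum hlo_even hT
          simp only [List.nil_append, List.length_nil, Nat.cast_zero] at key
          rw [show find n data = findLoopA s n data.sum 0 from rfl, hs]
          exact key
        -- evaluate B
        rw [hA]
        unfold find_alt
        rw [if_neg hn]
        simp only [mod2_int]
        have hmin' : (PySem.List.min? (data.filter (fun x => decide (x % 2 ≠ 0))) fun x => x) = some m := by
          simpa [mod2_int] using hmin
        rw [if_neg hT, hmin']
        simp only [hflen, hfsum]
        by_cases hc : (lo.length : Int) + 2 ≤ n
        · rw [if_pos (by omega), if_pos hc]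
        · rw [if_neg (by omega), if_neg hc]

-- ===== VERDICT (by name: the statement is the Claim_ definition above) =====
theorem find_spec : Claim_equal_find := by
  intro n data _
  unfold Spec_find
  exact find_spec' n data
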